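-- pv_equiv track=rewrite | github.com/salve-org/salve | salve_ipc/server_functions/highlight/tokens.py | merge_tokens
-- ===== SOURCE A (Python) =====
-- Token = tuple[tuple[int, int], int, str]
--
-- def merge_tokens(tokens: list[Token]) -> list[Token]:
--     output_tokens: list[Token] = []
--     depth: int = 0
--     for token in tokens:
--         # Deal with basic edge case
--         if depth == 0:
--             output_tokens.append(token)
--             depth += 1
--             continue
--
--         previous_token = output_tokens[-1]
--
--         # Get our boolean checks
--         same_token_type: bool = previous_token[2] == token[2]
--         same_line: bool = previous_token[0][0] == token[0][0]
--         neighboring_tokens: bool = (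
--             previous_token[0][1] + previous_token[1] == token[0][1]
--         )
--
--         # Determine if tokens should be merged
--         if not (same_token_type and same_line and neighboring_tokens):
--             output_tokens.append(token)
--             depth += 1
--             continue
--
--         # Replace previous token with new token (we don't increase depth because we are substituting, not adding)
--         new_token: Token = (
--             (token[0][0], previous_token[0][1]),
--             previous_token[1] + token[1],
--             token[2],
--         )
--         output_tokens[-1] = new_token
--     return output_tokens
-- ===== SOURCE B (Python) =====
-- Token = tuple[tuple[int, int], int, str]
--
-- def merge_tokens(tokens: list[Token]) -> list[Token]:
--     # Pass 1: split into runs of consecutive raw tokens that are same-type,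
--     # same-line and exactly column-adjacent to the PREVIOUS RAW token.
--     runs: list[list[Token]] = []
--     cur: list[Token] = []
--     prev: Token | None = None
--     for tok in tokens:
--         if (
--             prev is not None
--             and prev[2] == tok[2]
--             and prev[0][0] == tok[0][0]
--             and prev[0][1] + prev[1] == tok[0][1]
--         ):
--             cur.append(tok)
--         else:
--             if cur:
--                 runs.append(cur)
--             cur = [tok]
--         prev = tok
--     if cur:
--         runs.append(cur)
--     # Pass 2: collapse each run into a single token.
--     return [
--         ((run[-1][0][0], run[0][0][1]), sum(t[1] for t in run), run[-1][2])
--         for run in runs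
--     ]
-- ===== Notes on version B (the rewrite author's own statement) =====
-- stated objective: alternative
-- what changed: Replaces A's single in-place loop that rewrites the last emitted (merged) token with a two-pass decomposition: first group tokens into runs by comparing each token with the previous RAW token, then reduce each run to one token (line/type from the run, first start column, summed lengths); correctness rests on the telescoping of the cumulative end-column check into the adjacent-pair check.
import Mathlib
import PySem

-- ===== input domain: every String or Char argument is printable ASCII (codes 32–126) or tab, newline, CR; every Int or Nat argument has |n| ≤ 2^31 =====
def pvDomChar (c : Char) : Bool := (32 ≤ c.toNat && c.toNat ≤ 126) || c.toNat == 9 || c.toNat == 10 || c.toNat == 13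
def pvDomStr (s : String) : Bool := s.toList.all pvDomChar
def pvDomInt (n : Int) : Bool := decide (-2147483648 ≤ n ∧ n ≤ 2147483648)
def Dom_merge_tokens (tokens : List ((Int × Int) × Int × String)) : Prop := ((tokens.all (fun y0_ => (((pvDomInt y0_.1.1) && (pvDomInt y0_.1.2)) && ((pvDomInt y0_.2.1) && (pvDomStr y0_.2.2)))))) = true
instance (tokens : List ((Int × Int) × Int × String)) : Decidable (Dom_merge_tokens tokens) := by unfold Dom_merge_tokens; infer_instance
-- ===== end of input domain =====

-- B replaces A's in-place last-token rewriting loop by a two-pass decomposition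
-- (group into runs by adjacency of consecutive RAW tokens, then reduce each run);
-- same cost, different structure (objective: alternative).

-- ===== PORT A =====
-- default used only to transliterate `output_tokens[-1]`, which Python reads only
-- when depth ≠ 0, i.e. when the list is provably nonempty (so the default is never taken).
def pvTokDefault : (Int × Int) × Int × String := ((0, 0), 0, "")

-- one iteration of A's for-loop over the state (output_tokens, depth)
def pvStepA (acc : List ((Int × Int) × Int × String) × Int) (token : (Int × Int) × Int × String) :
    List ((Int × Int) × Int × String) × Int :=
  let out := acc.1
  let depth := acc.2
  if depth = 0 then (out ++ [token], depth + 1)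
  else
    let previous_token := out.getLastD pvTokDefault
    if ¬ (previous_token.2.2 = token.2.2 ∧ previous_token.1.1 = token.1.1 ∧
          previous_token.1.2 + previous_token.2.1 = token.1.2) then
      (out ++ [token], depth + 1)
    else
      (out.dropLast ++ [((token.1.1, previous_token.1.2),
                         previous_token.2.1 + token.2.1, token.2.2)], depth)

def merge_tokens (tokens : List ((Int × Int) × Int × String)) : List ((Int × Int) × Int × String) :=
  (tokens.foldl pvStepA ([], 0)).1

-- ===== PORT B =====
-- pass 1: group into runs (prev = previous raw token, cur = current run being built)
def pvRunsAux (prev : (Int × Int) × Int × String) (cur : List ((Int × Int) × Int × String)) :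
    List ((Int × Int) × Int × String) → List (List ((Int × Int) × Int × String))
  | [] => [cur]
  | t :: ts =>
    if prev.2.2 = t.2.2 ∧ prev.1.1 = t.1.1 ∧ prev.1.2 + prev.2.1 = t.1.2 then
      pvRunsAux t (cur ++ [t]) ts
    else
      cur :: pvRunsAux t [t] ts

-- pass 2: collapse one run (run[-1] line/type, run[0] start column, summed lengths)
def pvReduce (run : List ((Int × Int) × Int × String)) : (Int × Int) × Int × String :=
  (((run.getLastD pvTokDefault).1.1, (run.headD pvTokDefault).1.2),
   (run.map (fun t => t.2.1)).sum, (run.getLastD pvTokDefault).2.2)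

def merge_tokens_alt (tokens : List ((Int × Int) × Int × String)) : List ((Int × Int) × Int × String) :=
  match tokens with
  | [] => []
  | t :: ts => (pvRunsAux t [t] ts).map pvReduce

-- ===== PRECONDITION & SPEC =====
def Spec_merge_tokens (tokens : List ((Int × Int) × Int × String)) (out : List ((Int × Int) × Int × String)) : Prop := out = merge_tokens_alt tokens
instance (tokens : List ((Int × Int) × Int × String)) (out : List ((Int × Int) × Int × String)) : Decidable (Spec_merge_tokens tokens out) := by unfold Spec_merge_tokens; infer_instance

-- ===== CLAIM (what is proved, stated in full; the proofs are below) =====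
def Claim_equal_merge_tokens : Prop := ∀ (tokens : List ((Int × Int) × Int × String)), Dom_merge_tokens tokens → Spec_merge_tokens tokens (merge_tokens tokens)

-- ===== LEMMAS AND PROOFS =====

-- midpoint form of the loop: structural recursion carrying the current merged token
def pvGo (cur : (Int × Int) × Int × String) :
    List ((Int × Int) × Int × String) → List ((Int × Int) × Int × String)
  | [] => [cur]
  | t :: ts =>
    if cur.2.2 = t.2.2 ∧ cur.1.1 = t.1.1 ∧ cur.1.2 + cur.2.1 = t.1.2 then
      pvGo ((t.1.1, cur.1.2), cur.2.1 + t.2.1, t.2.2) ts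
    else
      cur :: pvGo t ts

lemma pvReduce_col (run : List ((Int × Int) × Int × String)) :
    (pvReduce run).1.2 = (run.headD pvTokDefault).1.2 := rfl
lemma pvReduce_len (run : List ((Int × Int) × Int × String)) :
    (pvReduce run).2.1 = (run.map (fun t => t.2.1)).sum := rfl
lemma pvReduce_single (t : (Int × Int) × Int × String) : pvReduce [t] = t := by
  simp [pvReduce]

lemma pvFoldA_inv (ts : List ((Int × Int) × Int × String)) :
    ∀ (init : List ((Int × Int) × Int × String)) (cur : (Int × Int) × Int × String) (d : Int),
      1 ≤ d → (List.foldl pvStepA (init ++ [cur], d) ts).1 = init ++ pvGo cur ts := by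
  induction ts with
  | nil => intro init cur d _; simp [pvGo]
  | cons t ts ih =>
    intro init cur d hd
    have hd0 : ¬ d = 0 := by omega
    by_cases hc : cur.2.2 = t.2.2 ∧ cur.1.1 = t.1.1 ∧ cur.1.2 + cur.2.1 = t.1.2
    · have hstep : pvStepA (init ++ [cur], d) t
          = (init ++ [((t.1.1, cur.1.2), cur.2.1 + t.2.1, t.2.2)], d) := by
        simp [pvStepA, hd0, hc]
      simp only [List.foldl_cons, hstep]
      rw [ih init _ d hd]
      simp only [pvGo]
      rw [if_pos hc]
    · have hstep : pvStepA (init ++ [cur], d) t = ((init ++ [cur]) ++ [t], d + 1) := by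
        simp [pvStepA, hd0, hc]
      simp only [List.foldl_cons, hstep]
      rw [ih (init ++ [cur]) t (d + 1) (by omega)]
      simp only [pvGo]
      rw [if_neg hc]
      simp

lemma merge_tokens_eq_go (tokens : List ((Int × Int) × Int × String)) :
    merge_tokens tokens = match tokens with | [] => [] | t :: ts => pvGo t ts := by
  cases tokens with
  | nil => rfl
  | cons t ts =>
    have h1 : pvStepA ([], 0) t = ([t], 1) := by simp [pvStepA]
    simp only [merge_tokens, List.foldl_cons, h1]
    have := pvFoldA_inv ts [] t 1 (by omega)
    simpa using this

lemma pvRuns_inv (ts : List ((Int × Int) × Int × String)) :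
    ∀ (run : List ((Int × Int) × Int × String)),
      run ≠ [] →
      (run.headD pvTokDefault).1.2 + (run.map (fun t => t.2.1)).sum =
        (run.getLastD pvTokDefault).1.2 + (run.getLastD pvTokDefault).2.1 →
      pvGo (pvReduce run) ts = (pvRunsAux (run.getLastD pvTokDefault) run ts).map pvReduce := by
  induction ts with
  | nil => intro run _ _; simp [pvGo, pvRunsAux]
  | cons t ts ih =>
    intro run hne hinv
    by_cases hc : (run.getLastD pvTokDefault).2.2 = t.2.2 ∧
        (run.getLastD pvTokDefault).1.1 = t.1.1 ∧
        (run.getLastD pvTokDefault).1.2 + (run.getLastD pvTokDefault).2.1 = t.1.2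
    · have hc' : (pvReduce run).2.2 = t.2.2 ∧ (pvReduce run).1.1 = t.1.1 ∧
          (pvReduce run).1.2 + (pvReduce run).2.1 = t.1.2 := by
        refine ⟨hc.1, hc.2.1, ?_⟩
        rw [pvReduce_col, pvReduce_len, hinv]
        exact hc.2.2
      have hhead : (run ++ [t]).headD pvTokDefault = run.headD pvTokDefault := by
        cases run with | nil => exact absurd rfl hne | cons a as => rfl
      have hlast : (run ++ [t]).getLastD pvTokDefault = t := List.getLastD_concat ..
      have hsum : ((run ++ [t]).map (fun t => t.2.1)).sum =
          (run.map (fun t => t.2.1)).sum + t.2.1 := by simp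
      have hmerged : ((t.1.1, (pvReduce run).1.2), (pvReduce run).2.1 + t.2.1, t.2.2)
          = pvReduce (run ++ [t]) := by
        simp only [pvReduce, hhead, hlast, hsum]
      simp only [pvGo]
      rw [if_pos hc']
      simp only [pvRunsAux]
      rw [if_pos hc]
      have hinv' : ((run ++ [t]).headD pvTokDefault).1.2 +
          ((run ++ [t]).map (fun t => t.2.1)).sum =
          ((run ++ [t]).getLastD pvTokDefault).1.2 +
          ((run ++ [t]).getLastD pvTokDefault).2.1 := by
        rw [hhead, hsum, hlast, ← add_assoc, hinv]
        have := hc.2.2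
        omega
      have hrec := ih (run ++ [t]) (by simp) hinv'
      rw [hlast] at hrec
      rw [hmerged, hrec]
    · have hc' : ¬ ((pvReduce run).2.2 = t.2.2 ∧ (pvReduce run).1.1 = t.1.1 ∧
          (pvReduce run).1.2 + (pvReduce run).2.1 = t.1.2) := by
        intro h
        exact hc ⟨h.1, h.2.1, by rw [← hinv, ← pvReduce_col, ← pvReduce_len]; exact h.2.2⟩
      simp only [pvGo]
      rw [if_neg hc']
      simp only [pvRunsAux]
      rw [if_neg hc]
      simp only [List.map_cons]
      congr 1
      have hrec := ih [t] (by simp) (by simp)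
      rw [pvReduce_single,
          show ([t] : List ((Int × Int) × Int × String)).getLastD pvTokDefault = t from rfl] at hrec
      rw [hrec]

lemma merge_tokens_alt_eq_go (tokens : List ((Int × Int) × Int × String)) :
    merge_tokens_alt tokens = match tokens with | [] => [] | t :: ts => pvGo t ts := by
  cases tokens with
  | nil => rfl
  | cons t ts =>
    have hrec := pvRuns_inv ts [t] (by simp) (by simp)
    rw [pvReduce_single] at hrec
    have hl : ([t] : List ((Int × Int) × Int × String)).getLastD pvTokDefault = t := by
      simp [List.getLastD]
    rw [hl] at hrec
    simp only [merge_tokens_alt]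
    rw [← hrec]

-- ===== VERDICT (by name: the statement is the Claim_ definition above) =====
theorem merge_tokens_spec : Claim_equal_merge_tokens := by
  intro tokens _
  unfold Spec_merge_tokens
  rw [merge_tokens_eq_go, merge_tokens_alt_eq_go]
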